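-- pv_equiv track=rewrite | github.com/2N44/f_streaming | main/util.py | check_filename
-- ===== SOURCE A (Python) =====
-- def check_filename(file_name: str) -> str:
--
-- 	'''
-- 	check if any forbiden character is in the filename and remove it
-- 	'''
--
-- 	char_list = ['<', '>', '\\', '/', '*', '?', '|']
--
-- 	for char in char_list:
--
-- 		if char in file_name:
--
-- 			file_name = file_name.replace(char,'')
--
-- 	while file_name[-1] == ' ':
--
-- 		file_name = file_name[:-1]
--
-- 	return file_name
-- ===== SOURCE B (Python) =====
-- FORBIDDEN = set('<>\\/*?|')
--
-- def check_filename(file_name: str) -> str: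
--     return ''.join(c for c in file_name if c not in FORBIDDEN).rstrip(' ')
-- ===== Notes on version B (the rewrite author's own statement) =====
-- stated objective: idiomatic
-- what changed: Seven repeated str.replace scans plus a character-by-character trailing-space while loop are replaced by one filtering pass over the string and a single rstrip(' ').
-- crash fix: On inputs whose every character is forbidden or a space (including the empty string) A raises IndexError at file_name[-1]; B returns '' there. — e.g. on check_filename("? "): A raises IndexError, B returns ""
import Mathlib
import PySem

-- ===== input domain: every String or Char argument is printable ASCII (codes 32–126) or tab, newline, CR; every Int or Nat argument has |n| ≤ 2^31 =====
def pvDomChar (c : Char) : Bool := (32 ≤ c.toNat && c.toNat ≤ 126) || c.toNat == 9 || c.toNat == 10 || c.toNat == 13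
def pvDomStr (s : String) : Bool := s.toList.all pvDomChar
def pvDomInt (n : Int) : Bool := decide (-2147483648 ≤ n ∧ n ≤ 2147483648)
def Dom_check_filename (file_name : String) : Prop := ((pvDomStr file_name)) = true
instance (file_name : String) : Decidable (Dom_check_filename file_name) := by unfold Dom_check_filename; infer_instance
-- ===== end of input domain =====

-- B replaces A's seven repeated str.replace scans and its index-based trailing-space
-- while loop by one filtering pass and a single rstrip(' '). Return value only; A
-- raises IndexError where every character is forbidden/space (excluded by Pre_, see Raises_).

-- ===== PORT A =====
-- termination helpers for the while loop (cited by name in trimLoopA's decreasing_by)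
theorem pv_slice_neg_one {α : Type} (l : List α) :
    PySem.List.slice l none (some (-1)) = l.dropLast := by
  simp [PySem.List.slice, List.dropLast_eq_take]

theorem pv_pyGet_neg_one_ne_nil {α : Type} (l : List α) (x : α)
    (h : PySem.List.pyGet? l (-1) = some x) : l ≠ [] := by
  intro hnil; subst hnil; simp [PySem.List.pyGet?, PySem.List.pyIdx?] at h

-- the "while file_name[-1] == ' ': file_name = file_name[:-1]" loop of A (on code points)
def trimLoopA (l : List Char) : List Char :=
  if h : PySem.List.pyGet? l (-1) = some ' ' then
    trimLoopA (PySem.List.slice l none (some (-1)))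
  else l
termination_by l.length
decreasing_by
  rw [pv_slice_neg_one]
  have h1 := pv_pyGet_neg_one_ne_nil l ' ' h
  have h2 := List.length_pos_of_ne_nil h1
  simp [List.length_dropLast]; omega

def check_filename (file_name : String) : String :=
  let char_list : List String := ["<", ">", "\\", "/", "*", "?", "|"]
  let fn := char_list.foldl
    (fun fn ch => if PySem.Str.isIn ch fn then PySem.Str.replace fn ch "" else fn)
    file_name
  String.ofList (trimLoopA fn.toList)

-- ===== PORT B =====
def pvForbidden : List Char := ['<', '>', '\\', '/', '*', '?', '|']

def check_filename_alt (file_name : String) : String :=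
  -- ''.join(c for c in file_name if c not in FORBIDDEN).rstrip(' ')
  -- rstrip(' ') ported by hand: drop trailing ' ' characters (exact for this 1-char set)
  String.ofList
    (((file_name.toList.filter (fun c => !pvForbidden.contains c)).reverse.dropWhile
        (fun c => c == ' ')).reverse)

-- ===== PRECONDITION & SPEC =====
-- A raises IndexError when every character of the input is forbidden or a space
-- (the trimming loop then indexes an empty string); Pre_ excludes exactly those inputs.
def Pre_check_filename (file_name : String) : Prop :=
  file_name.toList.any (fun c => !pvForbidden.contains c && c != ' ') = true
instance (file_name : String) : Decidable (Pre_check_filename file_name) := by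
  unfold Pre_check_filename; infer_instance

def pvWitness_check_filename : String := "a"

-- On inputs whose every character is forbidden or a space (including "") A raises
-- IndexError at file_name[-1]; B returns "" there.
def Raises_check_filename (file_name : String) : Prop :=
  file_name.toList.all (fun c => pvForbidden.contains c || c == ' ') = true
instance (file_name : String) : Decidable (Raises_check_filename file_name) := by
  unfold Raises_check_filename; infer_instance

def pvRaiseWitness_check_filename : String := "? "
def pvRaiseWitnessOut_check_filename : String := ""

def Spec_check_filename (file_name : String) (out : String) : Prop :=
  out = check_filename_alt file_name
instance (file_name : String) (out : String) : Decidable (Spec_check_filename file_name out) := by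
  unfold Spec_check_filename; infer_instance

-- ===== CLAIM (what is proved, stated in full; the proofs are below) =====
def Claim_equal_check_filename : Prop :=
  ∀ (file_name : String), Dom_check_filename file_name → Pre_check_filename file_name →
    Spec_check_filename file_name (check_filename file_name)

def Claim_raises_check_filename : Prop :=
  (∀ (file_name : String), Dom_check_filename file_name → Raises_check_filename file_name →
    ¬ Pre_check_filename file_name) ∧
  (Dom_check_filename (pvRaiseWitness_check_filename) ∧
   Raises_check_filename (pvRaiseWitness_check_filename) ∧
   check_filename_alt (pvRaiseWitness_check_filename) = pvRaiseWitnessOut_check_filename)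

-- ===== LEMMAS AND PROOFS =====

-- str.replace(c, '') deletes every occurrence of the single character c
theorem replace_go_single (c : Char) (fuel : Nat) :
    ∀ (l acc : List Char), l.length ≤ fuel →
      PySem.Chars.replace.go [c] [] fuel l acc
        = acc.reverse ++ l.filter (fun x => x != c) := by
  induction fuel with
  | zero =>
    intro l acc h
    have hl : l = [] := List.eq_nil_of_length_eq_zero (Nat.le_zero.mp h)
    subst hl
    simp [PySem.Chars.replace.go]
  | succ n ih =>
    intro l acc h
    match l with
    | [] => simp [PySem.Chars.replace.go]
    | x :: t =>
      rw [PySem.Chars.replace.go]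
      simp only [List.length_cons] at h
      by_cases hx : x = c
      · subst hx
        have hpre : [x].isPrefixOf (x :: t) = true := by simp [List.isPrefixOf]
        simp only [hpre, if_pos, List.length_cons, List.length_nil, Nat.zero_add,
          List.drop_succ_cons, List.drop_zero, List.reverse_nil, List.nil_append]
        rw [ih t acc (by omega)]
        simp
      · have hpre : [c].isPrefixOf (x :: t) = false := by
          simp [List.isPrefixOf]
          exact fun hh => hx hh.symm
        simp only [hpre, Bool.false_eq_true, if_neg, not_false_iff]
        rw [ih t (x :: acc) (by omega)]
        simp [hx]

theorem replace_single (c : Char) (l : List Char) :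
    PySem.Chars.replace l [c] [] = l.filter (fun x => x != c) := by
  rw [PySem.Chars.replace]
  simpa using replace_go_single c l.length l [] le_rfl

-- one step of A's replace loop filters out that character (whether or not it occurs)
theorem stepA_toList (c : Char) (s : String) :
    ((if PySem.Str.isIn (String.ofList [c]) s
        then PySem.Str.replace s (String.ofList [c]) "" else s)).toList
      = s.toList.filter (fun x => x != c) := by
  by_cases hin : PySem.Str.isIn (String.ofList [c]) s = true
  · rw [if_pos hin]
    rw [PySem.Str.replace]
    simp [replace_single]
  · rw [if_neg hin]
    have hmem : c ∉ s.toList := by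
      intro hc
      apply hin
      rw [PySem.Str.isIn_iff_infix]
      obtain ⟨u, v, huv⟩ := List.append_of_mem hc
      exact ⟨u, v, by simp [huv]⟩
    rw [List.filter_eq_self.mpr]
    intro a ha
    simp only [bne_iff_ne, ne_eq]
    intro hac; subst hac; exact hmem ha

-- A's replace fold over any character list = one filter
theorem foldA_gen (cs : List Char) (s : String) :
    ((cs.map (fun c => String.ofList [c])).foldl
      (fun fn ch => if PySem.Str.isIn ch fn then PySem.Str.replace fn ch "" else fn)
      s).toList
    = s.toList.filter (fun x => !cs.contains x) := by
  induction cs generalizing s with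
  | nil => simp
  | cons c t ih =>
    simp only [List.map_cons, List.foldl_cons]
    rw [ih]
    conv_lhs => rw [show (if PySem.Str.isIn (String.ofList [c]) s
        then PySem.Str.replace s (String.ofList [c]) "" else s).toList
      = s.toList.filter (fun x => x != c) from stepA_toList c s]
    rw [List.filter_filter]
    apply List.filter_congr
    intro x _
    simp only [List.contains_cons, Bool.not_or, Bool.and_comm, bne]

-- A's replace fold = B's single filter
theorem foldA_eq_filter (s : String) :
    ((["<", ">", "\\", "/", "*", "?", "|"] : List String).foldl
      (fun fn ch => if PySem.Str.isIn ch fn then PySem.Str.replace fn ch "" else fn)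
      s).toList
    = s.toList.filter (fun c => !pvForbidden.contains c) := by
  have h := foldA_gen pvForbidden s
  have hmap : pvForbidden.map (fun c => String.ofList [c])
      = (["<", ">", "\\", "/", "*", "?", "|"] : List String) := by decide
  rw [hmap] at h
  exact h

-- A's trimming while loop = drop trailing spaces
theorem pyGet_neg_one {α : Type} (l : List α) :
    PySem.List.pyGet? l (-1) = l.getLast? := by
  cases l with
  | nil => simp [PySem.List.pyGet?, PySem.List.pyIdx?]
  | cons x t =>
    simp [PySem.List.pyGet?, PySem.List.pyIdx?, List.getLast?_eq_getElem?]

theorem trimLoopA_rev (r : List Char) :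
    trimLoopA r.reverse = (r.dropWhile (fun c => c == ' ')).reverse := by
  induction r with
  | nil => rw [trimLoopA]; simp [pyGet_neg_one]
  | cons c t ih =>
    rw [trimLoopA]
    by_cases hc : c = ' '
    · subst hc
      rw [dif_pos (by simp [pyGet_neg_one])]
      rw [pv_slice_neg_one]
      simp only [List.reverse_cons, List.dropLast_concat]
      rw [ih]
      simp
    · rw [dif_neg (by simp [pyGet_neg_one, hc])]
      simp [hc]

theorem trimLoopA_eq (l : List Char) :
    trimLoopA l = (l.reverse.dropWhile (fun c => c == ' ')).reverse := by
  simpa using trimLoopA_rev l.reverse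

-- ===== VERDICT (by name: the statement is the Claim_ definition above) =====
theorem check_filename_spec : Claim_equal_check_filename := by
  intro fn _ _
  unfold Spec_check_filename check_filename check_filename_alt
  simp only [trimLoopA_eq, foldA_eq_filter]

theorem check_filename_raises : Claim_raises_check_filename := by
  unfold Claim_raises_check_filename
  refine ⟨?_, by decide, by decide, by decide⟩
  intro fn _ hR hP
  unfold Raises_check_filename at hR
  unfold Pre_check_filename at hP
  rw [List.all_eq_true] at hR
  rw [List.any_eq_true] at hP
  obtain ⟨c, hc, hcb⟩ := hP
  have := hR c hc
  simp only [Bool.and_eq_true, Bool.not_eq_true', Bool.or_eq_true] at hcb this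
  rcases this with h | h
  · rw [h] at hcb; exact absurd hcb.1 (by simp)
  · rw [bne_iff_ne] at hcb; exact hcb.2 (by simpa using h)

-- recorded self-check: B's value at the raise witness, read back from the theorem above
theorem check_filename_raises_witness_ok :
    check_filename_alt pvRaiseWitness_check_filename = pvRaiseWitnessOut_check_filename := by
  have h := check_filename_raises
  unfold Claim_raises_check_filename at h
  exact h.2.2.2
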